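-- pv_equiv track=rewrite | github.com/Chopinsky/algo-problems | challenges/2499/2167.'''MinTimeToRemoveAllCarsCOntainingIllegalGodos.py | minimumTime0
-- ===== SOURCE A (Python) =====
-- def minimumTime0(s: str) -> int:
--   ans = len(s)
--   ops = []
--
--   for cart in s:
--     ops.append(-1 if cart == '0' else 1)
--
--   min_op = 0
--   accu = 0
--
--   for op in ops:
--     accu += op
--     min_op = min(min_op, accu)
--
--     if accu > 0:
--       accu = 0
--
--   return ans + min_op
-- ===== SOURCE B (Python) =====
-- def minimumTime0(s: str) -> int:
--     # Prefix DP: cost = min time to clear s[:i+1]; ans also pays the suffix n-1-i.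
--     n = len(s)
--     ans = n
--     cost = 0
--     for i, c in enumerate(s):
--         cost = min(cost + (0 if c == '0' else 2), i + 1)
--         ans = min(ans, cost + (n - 1 - i))
--     return ans
-- ===== Notes on version B (the rewrite author's own statement) =====
-- stated objective: alternative
-- what changed: Replaces A's two-pass approach (build an op list, then track the running minimum of a clamped balance and add it to len(s)) by the classic single-pass prefix DP: cost = min cost to clear the prefix ending at i, ans = min over i of cost plus the right-sweep of the remaining suffix.
import Mathlib
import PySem

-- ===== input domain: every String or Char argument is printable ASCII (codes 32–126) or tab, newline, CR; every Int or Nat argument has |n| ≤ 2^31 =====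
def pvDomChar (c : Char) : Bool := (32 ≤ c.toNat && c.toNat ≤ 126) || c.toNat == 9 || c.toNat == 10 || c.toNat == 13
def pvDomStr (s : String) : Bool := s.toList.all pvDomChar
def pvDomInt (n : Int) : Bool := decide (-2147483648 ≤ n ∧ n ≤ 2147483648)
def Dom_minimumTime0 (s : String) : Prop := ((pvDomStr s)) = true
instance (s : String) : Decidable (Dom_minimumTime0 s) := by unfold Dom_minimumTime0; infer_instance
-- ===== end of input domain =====

-- B replaces A's two-pass suffix-balance trick by the classic single-pass prefix DP
-- (cost to clear the prefix, plus right-sweep of the suffix); objective: simpler/alternative.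

-- ===== PORT A =====
def minimumTime0 (s : String) : Int :=
  let ans : Int := (s.toList.length : Int)
  let ops : List Int :=
    s.toList.foldl (fun acc cart => acc ++ [if cart = '0' then (-1 : Int) else 1]) []
  let st :=
    ops.foldl (fun (p : Int × Int) op =>
      let accu := p.2 + op
      let min_op := min p.1 accu
      let accu := if accu > 0 then 0 else accu
      (min_op, accu)) (0, 0)
  ans + st.1

-- ===== PORT B =====
def minimumTime0_alt (s : String) : Int :=
  let n : Int := (s.toList.length : Int)
  let st :=
    (PySem.List.enumerate s.toList).foldl (fun (p : Int × Int) ic =>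
      let cost := min (p.2 + (if ic.2 = '0' then (0 : Int) else 2)) (ic.1 + 1)
      let ans := min p.1 (cost + (n - 1 - ic.1))
      (ans, cost)) (n, 0)
  st.1

-- ===== PRECONDITION & SPEC =====
def Spec_minimumTime0 (s : String) (out : Int) : Prop := out = minimumTime0_alt s
instance (s : String) (out : Int) : Decidable (Spec_minimumTime0 s out) := by unfold Spec_minimumTime0; infer_instance

-- ===== CLAIM (what is proved, stated in full; the proofs are below) =====
def Claim_equal_minimumTime0 : Prop := ∀ (s : String), Dom_minimumTime0 s → Spec_minimumTime0 s (minimumTime0 s)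

-- ===== LEMMAS AND PROOFS =====

-- Core invariant: with A's loop state (m, a) (a ≤ 0 the clamped balance, m ≤ 0 its running
-- minimum) processed up to position i, B's state is (ans, cost) = (n + m, a + i).
theorem pv_loop_eq (l : List Char) (i m a n : Int)
    (hi : 0 ≤ i) (ha : a ≤ 0) (hm : m ≤ 0) (hn : n = i + l.length) :
    ((PySem.List.enumerate l i).foldl (fun (p : Int × Int) ic =>
      let cost := min (p.2 + (if ic.2 = '0' then (0 : Int) else 2)) (ic.1 + 1)
      let ans := min p.1 (cost + (n - 1 - ic.1))
      (ans, cost)) (n + m, a + i)).1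
    = n + (l.foldl (fun (p : Int × Int) cart =>
      let op : Int := if cart = '0' then (-1 : Int) else 1
      let accu := p.2 + op
      let min_op := min p.1 accu
      let accu := if accu > 0 then 0 else accu
      (min_op, accu)) (m, a)).1 := by
  induction l generalizing i m a with
  | nil => simp [PySem.List.enumerate]
  | cons c t ih =>
    rw [PySem.List.enumerate_cons]
    simp only [List.foldl_cons]
    set o : Int := if c = '0' then (-1 : Int) else 1 with ho
    set w : Int := if c = '0' then (0 : Int) else 2 with hw
    have how : w = o + 1 := by by_cases hc : c = '0' <;> simp [ho, hw, hc]
    set a' : Int := if a + o > 0 then 0 else a + o with ha'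
    have ha'min : a' = min (a + o) 0 := by rw [ha']; split_ifs <;> omega
    have e1 : min ((a + i) + w) (i + 1) = a' + (i + 1) := by rw [ha'min, how]; omega
    have e2 : min (n + m) (a' + (i + 1) + (n - 1 - i)) = n + min m (a + o) := by
      rw [ha'min]; omega
    rw [e1, e2]
    exact ih (i + 1) (min m (a + o)) a' (by omega) (by rw [ha'min]; omega) (by omega)
      (by push_cast [List.length_cons] at hn ⊢; omega)

theorem minimumTime0_eq_alt (s : String) : minimumTime0 s = minimumTime0_alt s := by
  unfold minimumTime0 minimumTime0_alt
  simp only [PySem.List.foldl_append_singleton_eq_map, List.nil_append, List.foldl_map]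
  have h := pv_loop_eq s.toList 0 0 0 (s.toList.length : Int)
    (by omega) (by omega) (by omega) (by omega)
  simp only [add_zero] at h
  exact h.symm

-- ===== VERDICT (by name: the statement is the Claim_ definition above) =====
theorem minimumTime0_spec : Claim_equal_minimumTime0 := by
  intro s _
  unfold Spec_minimumTime0
  exact minimumTime0_eq_alt s
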